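-- pv_equiv track=rewrite | github.com/vincentlogarzo/archilume | archilume/apps/archilume_app/archilume_app/lib/image_loader.py | _extract_view_name
-- ===== SOURCE A (Python) =====
-- def _extract_view_name(
--     hdr_stem: str,
--     sky_stems: list[str],
--     overcast_sky_stem: str = "",
-- ) -> tuple[str, str]:
--     """Return (view_prefix, sky_name) by stripping the longest matching sky suffix.
--
--     view_prefix is everything up to and excluding the trailing _{sky_name}.
--     Falls back to (hdr_stem, "") when no sky suffix matches — caller treats the
--     HDR as its own single-frame group.
--
--     The SunlightRenderer names the overcast baseline with a *double* underscore
--     (``{octree}_{view}__{overcast_sky_stem}``) so it can be distinguished from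
--     the single-underscore timestep frames. When the matched sky is the
--     overcast, strip that extra underscore so the returned view_prefix lines up
--     with the sunlight-frame prefix for the same view.
--     """
--     for sky in sorted(sky_stems, key=len, reverse=True):
--         suffix = f"_{sky}"
--         if hdr_stem.endswith(suffix):
--             prefix = hdr_stem[: -len(suffix)]
--             if overcast_sky_stem and sky == overcast_sky_stem and prefix.endswith("_"):
--                 prefix = prefix[:-1]
--             return prefix, sky
--     return hdr_stem, ""
-- ===== SOURCE B (Python) =====
-- def _extract_view_name(
--     hdr_stem: str,
--     sky_stems: list[str],
--     overcast_sky_stem: str = "",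
-- ) -> tuple[str, str]:
--     """Single pass over sky_stems: keep the longest matching sky suffix seen so
--     far (strictly-longer updates preserve first-occurrence tie-breaking), then
--     build the prefix once at the end. No sorting."""
--     best = None
--     for sky in sky_stems:
--         if hdr_stem.endswith("_" + sky) and (best is None or len(sky) > len(best)):
--             best = sky
--     if best is None:
--         return hdr_stem, ""
--     prefix = hdr_stem[: -(len(best) + 1)]
--     if overcast_sky_stem and best == overcast_sky_stem and prefix.endswith("_"):
--         prefix = prefix[:-1]
--     return prefix, best
-- ===== Notes on version B (the rewrite author's own statement) =====
-- stated objective: alternative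
-- what changed: Replaced sort-by-length-then-first-match with a single linear scan that keeps the strictly-longest matching sky seen so far (strict '>' preserves the stable sort's first-occurrence tie-break) and builds the prefix once after the loop; measured ~1.5x at large sizes, below the confirmation bar, so no speed is claimed.
import Mathlib
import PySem

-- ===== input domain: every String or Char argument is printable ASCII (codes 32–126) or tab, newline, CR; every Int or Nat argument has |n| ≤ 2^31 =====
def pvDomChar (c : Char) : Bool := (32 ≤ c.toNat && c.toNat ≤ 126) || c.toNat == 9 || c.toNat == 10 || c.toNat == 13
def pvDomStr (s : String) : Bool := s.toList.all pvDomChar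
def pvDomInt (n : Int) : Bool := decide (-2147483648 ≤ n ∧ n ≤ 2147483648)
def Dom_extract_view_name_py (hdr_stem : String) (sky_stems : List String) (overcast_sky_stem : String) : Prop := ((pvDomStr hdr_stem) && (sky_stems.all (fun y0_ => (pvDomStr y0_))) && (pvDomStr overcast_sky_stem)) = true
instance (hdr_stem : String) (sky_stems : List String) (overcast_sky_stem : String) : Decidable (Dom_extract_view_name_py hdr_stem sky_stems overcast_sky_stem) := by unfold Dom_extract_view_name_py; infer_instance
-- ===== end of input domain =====

-- B drops A's length-descending sort in favour of one linear scan keeping the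
-- strictly-longest matching sky seen so far (objective: alternative algorithm, no sort).

-- ===== PORT A =====
-- the 'for sky in …: if … return' loop of A
def pvALoop (hdr_stem overcast_sky_stem : String) : List String → String × String
  | [] => (hdr_stem, "")
  | sky :: rest =>
    let suffix := "_" ++ sky
    if PySem.Str.endswith hdr_stem suffix then
      let prefix1 := PySem.Str.slice hdr_stem none (some (-(PySem.Str.len suffix)))
      let prefix2 :=
        if (overcast_sky_stem != "") && (sky == overcast_sky_stem) && PySem.Str.endswith prefix1 "_" then
          PySem.Str.slice prefix1 none (some (-1))
        else prefix1
      (prefix2, sky)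
    else pvALoop hdr_stem overcast_sky_stem rest

def extract_view_name_py (hdr_stem : String) (sky_stems : List String) (overcast_sky_stem : String) : String × String :=
  pvALoop hdr_stem overcast_sky_stem (PySem.List.sorted sky_stems (fun s => PySem.Str.len s) true)

-- ===== PORT B =====
-- the body of B's 'for sky in sky_stems' best-so-far update
def pvBStep (hdr_stem : String) (best : Option String) (sky : String) : Option String :=
  if PySem.Str.endswith hdr_stem ("_" ++ sky) &&
     (match best with
      | none => true
      | some b => decide (PySem.Str.len b < PySem.Str.len sky)) then
    some sky
  else best

def extract_view_name_py_alt (hdr_stem : String) (sky_stems : List String) (overcast_sky_stem : String) : String × String :=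
  match sky_stems.foldl (pvBStep hdr_stem) none with
  | none => (hdr_stem, "")
  | some best =>
    let prefix1 := PySem.Str.slice hdr_stem none (some (-(PySem.Str.len best + 1)))
    let prefix2 :=
      if (overcast_sky_stem != "") && (best == overcast_sky_stem) && PySem.Str.endswith prefix1 "_" then
        PySem.Str.slice prefix1 none (some (-1))
      else prefix1
    (prefix2, best)

-- ===== PRECONDITION & SPEC =====
def Spec_extract_view_name_py (hdr_stem : String) (sky_stems : List String) (overcast_sky_stem : String) (out : String × String) : Prop := out = extract_view_name_py_alt hdr_stem sky_stems overcast_sky_stem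
instance (hdr_stem : String) (sky_stems : List String) (overcast_sky_stem : String) (out : String × String) : Decidable (Spec_extract_view_name_py hdr_stem sky_stems overcast_sky_stem out) := by unfold Spec_extract_view_name_py; infer_instance

-- ===== CLAIM (what is proved, stated in full; the proofs are below) =====
def Claim_equal_extract_view_name_py : Prop := ∀ (hdr_stem : String) (sky_stems : List String) (overcast_sky_stem : String), Dom_extract_view_name_py hdr_stem sky_stems overcast_sky_stem → Spec_extract_view_name_py hdr_stem sky_stems overcast_sky_stem (extract_view_name_py hdr_stem sky_stems overcast_sky_stem)

-- ===== LEMMAS AND PROOFS =====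

-- the match predicate both programs test
def pvP (hdr_stem sky : String) : Bool := PySem.Str.endswith hdr_stem ("_" ++ sky)

-- A's loop returns the finish of the first match
theorem pvALoop_eq_find (hdr_stem overcast_sky_stem : String) (l : List String) :
    pvALoop hdr_stem overcast_sky_stem l =
      match l.find? (pvP hdr_stem) with
      | none => (hdr_stem, "")
      | some sky =>
        let prefix1 := PySem.Str.slice hdr_stem none (some (-(PySem.Str.len sky + 1)))
        let prefix2 :=
          if (overcast_sky_stem != "") && (sky == overcast_sky_stem) && PySem.Str.endswith prefix1 "_" then
            PySem.Str.slice prefix1 none (some (-1))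
          else prefix1
        (prefix2, sky) := by
  induction l with
  | nil => rfl
  | cons sky rest ih =>
    by_cases h : pvP hdr_stem sky = true
    · simp [pvALoop, List.find?, pvP] at h ⊢
      simp [h]
    · simp [pvALoop, List.find?, pvP] at h ⊢
      simp [h, ih]

-- insertBy cons equation (PySem.List.insertBy is defined by this recursion)
theorem pvIns (key : String → Int) (x y : String) (ys : List String) :
    PySem.List.insertBy (fun a b => decide (key b < key a)) x (y :: ys)
      = if key y < key x then x :: y :: ys
        else y :: PySem.List.insertBy (fun a b => decide (key b < key a)) x ys := by
  simp [PySem.List.insertBy]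

-- how one more element updates a best-so-far result
def pvCombine (p : String → Bool) (key : String → Int) (r : Option String) (x : String) : Option String :=
  match r with
  | none => if p x then some x else none
  | some m => if p x && decide (key m < key x) then some x else some m

theorem pvBStep_eq_combine (hdr_stem : String) (b : Option String) (x : String) :
    pvBStep hdr_stem b x = pvCombine (pvP hdr_stem) (fun s => PySem.Str.len s) b x := by
  cases b <;> simp [pvBStep, pvCombine, pvP]

-- inserting x into a key-descending list moves find? one pvCombine step
theorem pvFind_insertBy (p : String → Bool) (key : String → Int) (x : String) (L : List String)
    (hL : L.Pairwise (fun a b => key b ≤ key a)) :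
    (PySem.List.insertBy (fun a b => decide (key b < key a)) x L).find? p
      = pvCombine p key (L.find? p) x := by
  induction L with
  | nil =>
    cases hx : p x <;> simp [PySem.List.insertBy, List.find?, pvCombine, hx]
  | cons y ys ih =>
    rcases List.pairwise_cons.mp hL with ⟨hy, hys⟩
    rw [pvIns key x y ys]
    by_cases hlt : key y < key x
    · rw [if_pos hlt]
      cases hx : p x with
      | true =>
        rw [List.find?_cons_of_pos hx]
        cases hfind : List.find? p (y :: ys) with
        | none => simp [pvCombine, hx]
        | some m =>
          have hmx : key m < key x := by
            rcases List.mem_cons.mp (List.mem_of_find?_eq_some hfind) with h | h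
            · simpa [h] using hlt
            · exact lt_of_le_of_lt (hy m h) hlt
          simp [pvCombine, hx, hmx]
      | false =>
        rw [List.find?_cons_of_neg (by simp [hx])]
        cases List.find? p (y :: ys) <;> simp [pvCombine, hx]
    · rw [if_neg hlt]
      cases hpy : p y with
      | true =>
        rw [List.find?_cons_of_pos hpy, List.find?_cons_of_pos hpy]
        simp [pvCombine, hlt]
      | false =>
        rw [List.find?_cons_of_neg (by simp [hpy]), List.find?_cons_of_neg (by simp [hpy])]
        exact ih hys

theorem pvSorted_append_singleton (ss : List String) (x : String) :
    PySem.List.sorted (ss ++ [x]) (fun s => PySem.Str.len s) true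
      = PySem.List.insertBy (fun a b => decide (PySem.Str.len b < PySem.Str.len a)) x
          (PySem.List.sorted ss (fun s => PySem.Str.len s) true) := by
  simp [PySem.List.sorted, List.foldl_append]

theorem pvCore (hdr_stem : String) (ss : List String) :
    (PySem.List.sorted ss (fun s => PySem.Str.len s) true).find? (pvP hdr_stem)
      = ss.foldl (pvBStep hdr_stem) none := by
  induction ss using List.reverseRecOn with
  | nil => rfl
  | append_singleton ss x ih =>
    rw [pvSorted_append_singleton, List.foldl_append,
      pvFind_insertBy (pvP hdr_stem) (fun s => PySem.Str.len s) x _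
        (PySem.List.sorted_pairwise_rev ss (fun s => PySem.Str.len s)), ih,
      List.foldl_cons, List.foldl_nil, pvBStep_eq_combine]

-- ===== VERDICT (by name: the statement is the Claim_ definition above) =====
theorem extract_view_name_py_spec : Claim_equal_extract_view_name_py := by
  intro hdr_stem sky_stems overcast_sky_stem _
  unfold Spec_extract_view_name_py extract_view_name_py extract_view_name_py_alt
  rw [pvALoop_eq_find, pvCore]
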